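-- pv_equiv track=rewrite | github.com/a6987985/new-gui | new_gui/ui/builders/top_button_layout.py | _fit_button_widths_to_target
-- ===== SOURCE A (Python) =====
-- def _fit_button_widths_to_target(base_widths, min_widths, target_width: int, spacing: int):
--     """Shrink widths just enough to fit the requested row width."""
--     fitted_widths = dict(base_widths or {})
--     if not fitted_widths or not target_width:
--         return fitted_widths
--
--     total_width = sum(fitted_widths.values()) + spacing * max(0, len(fitted_widths) - 1)
--     overflow = total_width - target_width
--     if overflow <= 0:
--         return fitted_widths
--
--     width_order = sorted(
--         fitted_widths.keys(),
--         key=lambda button_id: (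
--             fitted_widths[button_id] - min_widths.get(button_id, fitted_widths[button_id]),
--             fitted_widths[button_id],
--         ),
--         reverse=True,
--     )
--
--     while overflow > 0:
--         changed = False
--         for button_id in width_order:
--             minimum_width = min_widths.get(button_id, fitted_widths[button_id])
--             if fitted_widths[button_id] <= minimum_width:
--                 continue
--             fitted_widths[button_id] -= 1
--             overflow -= 1
--             changed = True
--             if overflow <= 0:
--                 break
--         if not changed:
--             break
--
--     return fitted_widths
-- ===== SOURCE B (Python) =====
-- def _fit_button_widths_to_target(base_widths, min_widths, target_width: int, spacing: int):
--     """Shrink widths just enough to fit the requested row width (water-filling: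
--     the number of complete shrink rounds is computed in closed form from the sorted
--     slacks, and the remainder is handed out one pixel per button in priority order)."""
--     fitted_widths = dict(base_widths or {})
--     if not fitted_widths or not target_width:
--         return fitted_widths
--
--     total_width = sum(fitted_widths.values()) + spacing * max(0, len(fitted_widths) - 1)
--     overflow = total_width - target_width
--     if overflow <= 0:
--         return fitted_widths
--
--     width_order = sorted(
--         fitted_widths.keys(),
--         key=lambda button_id: (
--             fitted_widths[button_id] - min_widths.get(button_id, fitted_widths[button_id]),
--             fitted_widths[button_id],
--         ),
--         reverse=True,
--     )
--     slack = [max(0, fitted_widths[b] - min_widths.get(b, fitted_widths[b])) for b in width_order]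
--     rem = min(overflow, sum(slack))  # total pixels that will actually be removed
--
--     # water level k = number of complete rounds; rem becomes the partial-round leftover
--     k = 0
--     n = len(slack)
--     for s in sorted(slack):
--         if rem <= (s - k) * n:
--             step = rem // n
--             k += step
--             rem -= step * n
--             break
--         rem -= (s - k) * n
--         k = s
--         n -= 1
--
--     removed = {}
--     for b, s in zip(width_order, slack):
--         take = s if s <= k else k
--         if s > k and rem > 0:
--             take += 1
--             rem -= 1
--         removed[b] = take
--
--     return {b: w - removed[b] for b, w in fitted_widths.items()}
-- ===== Notes on version B (the rewrite author's own statement) =====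
-- stated objective: alternative
-- what changed: A shrinks one pixel at a time in a round-robin while-loop over the buttons until the overflow is gone; B computes the water level (number of complete shrink rounds) in closed form from the sorted slacks and hands out the remaining pixels in one pass in the same priority order.
import Mathlib
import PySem

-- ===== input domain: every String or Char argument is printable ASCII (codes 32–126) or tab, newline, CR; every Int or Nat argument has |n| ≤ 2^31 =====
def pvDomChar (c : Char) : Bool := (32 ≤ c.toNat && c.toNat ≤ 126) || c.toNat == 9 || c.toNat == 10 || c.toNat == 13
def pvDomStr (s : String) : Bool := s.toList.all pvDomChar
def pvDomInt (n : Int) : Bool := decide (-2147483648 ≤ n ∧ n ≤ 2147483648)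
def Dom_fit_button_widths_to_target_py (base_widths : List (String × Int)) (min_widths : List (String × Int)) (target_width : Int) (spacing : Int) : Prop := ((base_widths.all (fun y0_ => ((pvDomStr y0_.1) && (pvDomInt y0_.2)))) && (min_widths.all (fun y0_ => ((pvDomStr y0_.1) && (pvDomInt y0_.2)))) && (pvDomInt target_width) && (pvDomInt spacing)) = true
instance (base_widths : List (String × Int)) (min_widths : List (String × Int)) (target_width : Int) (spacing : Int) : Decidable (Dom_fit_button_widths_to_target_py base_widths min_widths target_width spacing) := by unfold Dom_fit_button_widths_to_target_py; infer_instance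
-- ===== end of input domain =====

-- B replaces A's one-pixel-at-a-time round-robin shrink loop by a closed-form
-- water-filling computation over the sorted slacks (alternative algorithm, same result).


-- ===== PORT A =====
-- inner `for button_id in width_order:` loop of the while-round; state = (fitted_widths, overflow, changed).
-- fitted_widths[button_id] is ported as getD _ 0: every button_id in width_order is a key of the dict, so the
-- default is never read (KeyError is impossible in the Python).
def pvAInner (minw : PySem.Dict String Int) : List String → PySem.Dict String Int → Int → Bool →
    PySem.Dict String Int × Int × Bool
  | [], d, ov, ch => (d, ov, ch)
  | b :: rest, d, ov, ch =>
      let cur := d.getD b 0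
      let m := minw.getD b cur
      if cur ≤ m then pvAInner minw rest d ov ch
      else
        let d' := d.insert b (cur - 1)
        if ov - 1 ≤ 0 then (d', ov - 1, true)
        else pvAInner minw rest d' (ov - 1) true

-- termination facts for the outer `while overflow > 0` loop (cited by pvAOuter's decreasing_by)
theorem pvAInner_ov (minw : PySem.Dict String Int) :
    ∀ (l : List String) (d : PySem.Dict String Int) (ov : Int) (ch : Bool),
      (pvAInner minw l d ov ch).2.1 ≤ ov ∧
      (ch = false → (pvAInner minw l d ov ch).2.2 = true → (pvAInner minw l d ov ch).2.1 < ov) := by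
  intro l
  induction l with
  | nil => intro d ov ch; simp [pvAInner]
  | cons b rest ih =>
      intro d ov ch
      simp only [pvAInner]
      split
      · exact ih d ov ch
      · split
        · exact ⟨by show ov - 1 ≤ ov; omega, fun _ _ => by show ov - 1 < ov; omega⟩
        · refine ⟨?_, ?_⟩
          · have := (ih (d.insert b (d.getD b 0 - 1)) (ov - 1) true).1; omega
          · intro _ _
            have := (ih (d.insert b (d.getD b 0 - 1)) (ov - 1) true).1; omega

-- `while overflow > 0:` loop
def pvAOuter (minw : PySem.Dict String Int) (order : List String)
    (d : PySem.Dict String Int) (ov : Int) : PySem.Dict String Int :=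
  if h : 0 < ov then
    let r := pvAInner minw order d ov false
    if hc : r.2.2 = true then pvAOuter minw order r.1 r.2.1
    else r.1
  else d
termination_by ov.toNat
decreasing_by
  have h1 := (pvAInner_ov minw order d ov false).2 rfl hc
  omega

def fit_button_widths_to_target_py (base_widths : List (String × Int)) (min_widths : List (String × Int)) (target_width : Int) (spacing : Int) : List (String × Int) :=
  -- fitted_widths = dict(base_widths or {}) ; min_widths is a dict on the Python side: both are
  -- materialised with Dict.ofList (Python's dict(list) semantics, last value wins on duplicate keys)
  let fitted := PySem.Dict.ofList base_widths
  if fitted.items = [] ∨ target_width = 0 then fitted.items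
  else
    let minw := PySem.Dict.ofList min_widths
    let total := fitted.values.sum + spacing * max 0 ((fitted.size : Int) - 1)
    let overflow := total - target_width
    if overflow ≤ 0 then fitted.items
    else
      let order := PySem.List.sorted2 fitted.keys
        (fun b => fitted.getD b 0 - minw.getD b (fitted.getD b 0))
        (fun b => fitted.getD b 0) true
      (pvAOuter minw order fitted overflow).items

-- ===== PORT B =====
-- `for s in sorted(slack):` — find the water level k (number of complete rounds) and the leftover rem
def pvBLevel : List Int → Int → Int → Int → Int × Int
  | [], k, rem, _n => (k, rem)
  | s :: rest, k, rem, n =>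
      if rem ≤ (s - k) * n then
        let step := PySem.Int.floordiv rem n
        (k + step, rem - step * n)
      else pvBLevel rest s (rem - (s - k) * n) (n - 1)

-- `for b, s in zip(width_order, slack):` — hand the leftover out one pixel per eligible button
def pvBDist : List (String × Int) → Int → Int → PySem.Dict String Int → PySem.Dict String Int × Int
  | [], _k, rem, removed => (removed, rem)
  | (b, s) :: rest, k, rem, removed =>
      let take := if s ≤ k then s else k
      if k < s ∧ 0 < rem then pvBDist rest k (rem - 1) (removed.insert b (take + 1))
      else pvBDist rest k rem (removed.insert b take)

def fit_button_widths_to_target_py_alt (base_widths : List (String × Int)) (min_widths : List (String × Int)) (target_width : Int) (spacing : Int) : List (String × Int) :=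
  let fitted := PySem.Dict.ofList base_widths
  if fitted.items = [] ∨ target_width = 0 then fitted.items
  else
    let minw := PySem.Dict.ofList min_widths
    let total := fitted.values.sum + spacing * max 0 ((fitted.size : Int) - 1)
    let overflow := total - target_width
    if overflow ≤ 0 then fitted.items
    else
      let order := PySem.List.sorted2 fitted.keys
        (fun b => fitted.getD b 0 - minw.getD b (fitted.getD b 0))
        (fun b => fitted.getD b 0) true
      let slack := order.map (fun b => max 0 (fitted.getD b 0 - minw.getD b (fitted.getD b 0)))
      let rem0 := min overflow slack.sum
      let kr := pvBLevel (PySem.List.sorted slack (fun x => x) false) 0 rem0 (slack.length : Int)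
      -- removed[b] is always present for keys of fitted (width_order covers them): getD's default is never read
      let removed := (pvBDist (order.zip slack) kr.1 kr.2 PySem.Dict.empty).1
      fitted.items.map (fun p => (p.1, p.2 - removed.getD p.1 0))

-- ===== PRECONDITION & SPEC =====
def Spec_fit_button_widths_to_target_py (base_widths : List (String × Int)) (min_widths : List (String × Int)) (target_width : Int) (spacing : Int) (out : List (String × Int)) : Prop := out = fit_button_widths_to_target_py_alt base_widths min_widths target_width spacing
instance (base_widths : List (String × Int)) (min_widths : List (String × Int)) (target_width : Int) (spacing : Int) (out : List (String × Int)) : Decidable (Spec_fit_button_widths_to_target_py base_widths min_widths target_width spacing out) := by unfold Spec_fit_button_widths_to_target_py; infer_instance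

-- ===== CLAIM (what is proved, stated in full; the proofs are below) =====
def Claim_equal_fit_button_widths_to_target_py : Prop := ∀ (base_widths : List (String × Int)) (min_widths : List (String × Int)) (target_width : Int) (spacing : Int), Dom_fit_button_widths_to_target_py base_widths min_widths target_width spacing → Spec_fit_button_widths_to_target_py base_widths min_widths target_width spacing (fit_button_widths_to_target_py base_widths min_widths target_width spacing)

-- ===== LEMMAS AND PROOFS =====

def pvStateD (items0 : List (String × Int)) (g : String → Int) : PySem.Dict String Int :=
  PySem.Dict.mk (items0.map (fun p => (p.1, g p.1)))

theorem pvStateD_keys (items0 : List (String × Int)) (g : String → Int) :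
    (pvStateD items0 g).keys = items0.map (·.1) := by
  simp [pvStateD, PySem.Dict.keys, Function.comp]

theorem pvStateD_getD (items0 : List (String × Int)) (g : String → Int) (b : String)
    (hnd : (items0.map (·.1)).Nodup) (hb : b ∈ items0.map (·.1)) :
    (pvStateD items0 g).getD b 0 = g b := by
  obtain ⟨p, hp, rfl⟩ := List.mem_map.mp hb
  have hmem : (p.1, g p.1) ∈ (pvStateD items0 g).items := by
    show (p.1, g p.1) ∈ items0.map (fun p => (p.1, g p.1))
    exact List.mem_map.mpr ⟨p, hp, rfl⟩
  exact PySem.Dict.getD_of_mem_items _ hmem (by rw [pvStateD_keys]; exact hnd) 0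

theorem pvStateD_insert (items0 : List (String × Int)) (g : String → Int) (b : String) (v : Int)
    (hb : b ∈ items0.map (·.1)) :
    (pvStateD items0 g).insert b v = pvStateD items0 (fun x => if x = b then v else g x) := by
  apply PySem.Dict.ext
  have hc : (pvStateD items0 g).contains b = true := by
    rw [PySem.Dict.contains_iff_mem_keys, pvStateD_keys]; exact hb
  rw [PySem.Dict.items_insert_of_contains _ _ hc]
  show List.map _ (items0.map (fun p => (p.1, g p.1))) = items0.map _
  rw [List.map_map]
  apply List.map_congr_left
  intro p _hp
  by_cases h : p.1 = b <;> simp [h]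

theorem pvStateD_congr (items0 : List (String × Int)) (g g' : String → Int)
    (h : ∀ b ∈ items0.map (·.1), g b = g' b) : pvStateD items0 g = pvStateD items0 g' := by
  apply PySem.Dict.ext
  apply List.map_congr_left
  intro p hp
  rw [h p.1 (List.mem_map.mpr ⟨p, hp, rfl⟩)]

theorem pvAInner_spec (minw : PySem.Dict String Int) (items0 : List (String × Int))
    (hnd : (items0.map (·.1)).Nodup) :
    ∀ (l : List String) (g : String → Int) (ov : Int) (ch : Bool),
      (∀ b ∈ l, b ∈ items0.map (·.1)) → l.Nodup → 0 < ov →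
      pvAInner minw l (pvStateD items0 g) ov ch =
        (pvStateD items0 (fun x =>
            if x ∈ (l.filter (fun b => decide (minw.getD b (g b) < g b))).take ov.toNat
            then g x - 1 else g x),
         ov - ((l.filter (fun b => decide (minw.getD b (g b) < g b))).take ov.toNat).length,
         ch || !((l.filter (fun b => decide (minw.getD b (g b) < g b))).take ov.toNat).isEmpty) := by
  intro l
  induction l with
  | nil =>
      intro g ov ch _ _ hov
      simp [pvAInner]
  | cons b rest ih =>
      intro g ov ch hmem hnodup hov
      have hb : b ∈ items0.map (·.1) := hmem b (by simp)
      have hcur : (pvStateD items0 g).getD b 0 = g b := pvStateD_getD _ _ _ hnd hb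
      rw [pvAInner, hcur]
      by_cases he : g b ≤ minw.getD b (g b)
      · -- not eligible
        rw [if_pos he]
        have hfilter : (b :: rest).filter (fun b => decide (minw.getD b (g b) < g b))
            = rest.filter (fun b => decide (minw.getD b (g b) < g b)) := by
          rw [List.filter_cons]
          simp [not_lt.mpr he]
        rw [hfilter]
        exact ih g ov ch (fun x hx => hmem x (List.mem_cons_of_mem _ hx)) hnodup.of_cons hov
      · -- eligible
        rw [if_neg he]
        have hbrest : b ∉ rest := (List.nodup_cons.mp hnodup).1
        have hfilter : (b :: rest).filter (fun x => decide (minw.getD x (g x) < g x))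
            = b :: rest.filter (fun x => decide (minw.getD x (g x) < g x)) := by
          rw [List.filter_cons]
          simp [lt_of_not_ge he]
        rw [hfilter]
        have htake : (b :: rest.filter (fun x => decide (minw.getD x (g x) < g x))).take ov.toNat
            = b :: (rest.filter (fun x => decide (minw.getD x (g x) < g x))).take (ov - 1).toNat := by
          have : ov.toNat = ((ov - 1).toNat) + 1 := by omega
          rw [this, List.take_succ_cons]
        rw [htake]
        rw [pvStateD_insert _ _ _ _ hb]
        by_cases hov1 : ov - 1 ≤ 0
        · -- ov = 1: break
          have hov1' : ov = 1 := by omega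
          rw [if_pos hov1]
          have htake0 : ((rest.filter (fun x => decide (minw.getD x (g x) < g x))).take (ov - 1).toNat) = [] := by
            have : (ov - 1).toNat = 0 := by omega
            simp [this]
          rw [htake0]
          refine Prod.ext ?_ (Prod.ext ?_ ?_) <;> dsimp only
          · apply pvStateD_congr
            intro x _
            by_cases hx : x = b <;> simp [hx]
          · simp <;> omega
          · simp
        · rw [if_neg hov1]
          rw [ih (fun x => if x = b then g b - 1 else g x) (ov - 1) true
            (fun x hx => hmem x (List.mem_cons_of_mem _ hx)) hnodup.of_cons (by omega)]
          have hfeq : rest.filter (fun x => decide (minw.getD x ((fun x => if x = b then g b - 1 else g x) x)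
                  < (fun x => if x = b then g b - 1 else g x) x))
              = rest.filter (fun x => decide (minw.getD x (g x) < g x)) := by
            apply List.filter_congr
            intro x hx
            have : x ≠ b := fun h => hbrest (h ▸ hx)
            simp [this]
          rw [hfeq]
          refine Prod.ext ?_ (Prod.ext ?_ ?_) <;> dsimp only
          · apply pvStateD_congr
            intro x _
            by_cases hx : x = b
            · subst hx
              have hnotin : x ∉ (rest.filter (fun y => decide (minw.getD y (g y) < g y))).take (ov.toNat - 1) := by
                rw [show ov.toNat - 1 = (ov - 1).toNat by omega]
                exact fun h => hbrest (List.mem_of_mem_filter (List.mem_of_mem_take h))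
              simp [hnotin]
            · simp [hx]
          · simp <;> omega
          · simp

theorem pvSumShift (f : Int → Int) :
    ∀ (t : List Int) (a b : Int),
      (t.map (fun x => f x - a)).sum = (t.map (fun x => f x - b)).sum + (t.length : Int) * (b - a) := by
  intro t a b
  induction t with
  | nil => simp
  | cons y t iht =>
      simp only [List.map_cons, List.sum_cons, List.length_cons]
      rw [iht]
      push_cast
      ring

theorem pvBLevel_spec :
    ∀ (l : List Int) (k rem n : Int), n = (l.length : Int) →
      l.Pairwise (· ≤ ·) → (∀ x ∈ l, k ≤ x) → 0 ≤ rem →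
      rem ≤ (l.map (fun x => x - k)).sum →
      k ≤ (pvBLevel l k rem n).1 ∧
      0 ≤ (pvBLevel l k rem n).2 ∧
      (l.map (fun x => min x (pvBLevel l k rem n).1 - k)).sum + (pvBLevel l k rem n).2 = rem ∧
      ((pvBLevel l k rem n).2 = 0 ∨
        (pvBLevel l k rem n).2 < (l.countP (fun x => decide ((pvBLevel l k rem n).1 < x)) : Int)) := by
  intro l
  induction l with
  | nil =>
      intro k rem n _ _ _ h0 hle
      simp only [pvBLevel, List.map_nil, List.sum_nil, List.countP_nil] at *
      omega
  | cons s rest ih =>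
      intro k rem n hn hsorted hmem h0 hle
      have hn1 : (0:Int) < n := by rw [hn]; simp
      have hks : k ≤ s := hmem s (by simp)
      have hrest : ∀ x ∈ rest, s ≤ x := fun x hx => List.rel_of_pairwise_cons hsorted hx
      have hnlen : n = (rest.length : Int) + 1 := by rw [hn]; push_cast [List.length_cons]; ring
      rw [pvBLevel]
      by_cases hbr : rem ≤ (s - k) * n
      · rw [if_pos hbr]
        simp only [PySem.Int.floordiv_eq_ediv_of_pos hn1]
        set q := rem / n with hq
        have hdm : n * q + rem % n = rem := Int.ediv_add_emod rem n
        have hm0 : 0 ≤ rem % n := Int.emod_nonneg rem (ne_of_gt hn1)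
        have hmlt : rem % n < n := Int.emod_lt_of_pos rem hn1
        have hq0 : 0 ≤ q := Int.ediv_nonneg h0 (le_of_lt hn1)
        have hcomm : n * q = q * n := mul_comm n q
        have hqn : q * n ≤ rem := by linarith
        have hq_le : q ≤ s - k := by
          by_contra hcon
          push_neg at hcon
          have : (s - k) * n < q * n := by
            apply mul_lt_mul_of_pos_right hcon hn1
          linarith
        have hmap : ((s :: rest).map (fun x => min x (k + q) - k)).sum = n * q := by
          have hc : ∀ x ∈ (s :: rest), min x (k + q) - k = q := by
            intro x hx
            rcases List.mem_cons.mp hx with rfl | hx'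
            · omega
            · have := hrest x hx'; omega
          rw [List.map_congr_left hc]
          simp only [List.map_const']
          rw [List.sum_replicate, List.length_cons, Int.nsmul_eq_mul]
          push_cast
          rw [hnlen]
        refine ⟨by omega, by linarith, ?_, ?_⟩
        · rw [hmap]; linarith
        · by_cases hr0 : rem - q * n = 0
          · left; omega
          · right
            have hq_lt : q < s - k := by
              rcases lt_or_eq_of_le hq_le with h | h
              · exact h
              · exfalso
                rw [h] at hqn hcomm
                have : (s - k) * n ≤ rem := hqn
                apply hr0
                rw [h]
                linarith
            have hcnt : ((s :: rest).countP (fun x => decide (k + q < x))) = (s :: rest).length := by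
              apply List.countP_eq_length.mpr
              intro x hx
              rcases List.mem_cons.mp hx with rfl | hx'
              · simp; omega
              · have := hrest x hx'; simp; omega
            rw [hcnt, ← hn]
            linarith
      · rw [if_neg hbr]
        push_neg at hbr
        have hrem' : 0 ≤ rem - (s - k) * n := by linarith
        have hshift := pvSumShift (fun x => x) rest k s
        have hlenprod : ((rest.length : Int)) * (s - k) = (s - k) * n - (s - k) := by
          rw [hnlen]; ring
        have hle' : rem - (s - k) * n ≤ (rest.map (fun x => x - s)).sum := by
          simp only [List.map_cons, List.sum_cons] at hle
          rw [hshift, hlenprod] at hle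
          linarith
        have hn' : n - 1 = (rest.length : Int) := by omega
        obtain ⟨hK1, hK2, hK3, hK4⟩ := ih s (rem - (s - k) * n) (n - 1) hn'
          hsorted.of_cons hrest hrem' hle'
        set res := pvBLevel rest s (rem - (s - k) * n) (n - 1) with hres
        refine ⟨by omega, hK2, ?_, ?_⟩
        · have hmins : min s res.1 = s := by omega
          have hlift := pvSumShift (fun x => min x res.1) rest k s
          simp only [List.map_cons, List.sum_cons, hmins]
          rw [hlift, hlenprod]
          linarith
        · rcases hK4 with h | h
          · left; exact h
          · right
            have hcnt : ((s :: rest).countP (fun x => decide (res.1 < x)))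
                = rest.countP (fun x => decide (res.1 < x)) := by
              rw [List.countP_cons]
              simp only [decide_eq_true_eq]
              have : ¬ (res.1 < s) := not_lt.mpr (le_trans (by omega : s ≤ s) hK1)
              simp [this]
            rw [hcnt]
            exact h

def pvW (fitted : PySem.Dict String Int) (b : String) : Int := fitted.getD b 0
def pvSlf (fitted minw : PySem.Dict String Int) (b : String) : Int :=
  max 0 (pvW fitted b - minw.getD b (pvW fitted b))

theorem pvSlf_nonneg (fitted minw : PySem.Dict String Int) (b : String) :
    0 ≤ pvSlf fitted minw b := le_max_left _ _

theorem pvElig (fitted minw : PySem.Dict String Int) (j : Int) (hj : 0 ≤ j) (b : String) :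
    (decide (minw.getD b (pvW fitted b - min (pvSlf fitted minw b) j)
        < pvW fitted b - min (pvSlf fitted minw b) j))
      = decide (j < pvSlf fitted minw b) := by
  rcases h : minw.get? b with _ | v
  · rw [PySem.Dict.getD_of_get?_eq_none minw _ h]
    have hs : pvSlf fitted minw b = 0 := by
      unfold pvSlf
      rw [PySem.Dict.getD_of_get?_eq_none minw _ h]
      omega
    rw [hs]
    simp
    omega
  · rw [PySem.Dict.getD_of_get?_eq_some minw _ h]
    have hs : pvSlf fitted minw b = max 0 (pvW fitted b - v) := by
      unfold pvSlf
      rw [PySem.Dict.getD_of_get?_eq_some minw _ h]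
    rw [hs]
    rw [decide_eq_decide]
    omega

theorem pvMinSum_zero (f : String → Int) (hf : ∀ b, 0 ≤ f b) :
    ∀ (l : List String), (l.map (fun b => min (f b) 0)).sum = 0 := by
  intro l
  induction l with
  | nil => simp
  | cons b t ih => simp only [List.map_cons, List.sum_cons, ih]; have := hf b; omega

theorem pvMinSum_succ (f : String → Int) (j : Int) :
    ∀ (l : List String), (l.map (fun b => min (f b) (j + 1))).sum
      = (l.map (fun b => min (f b) j)).sum + ((l.filter (fun b => decide (j < f b))).length : Int) := by
  intro l
  induction l with
  | nil => simp
  | cons b t ih =>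
      simp only [List.map_cons, List.sum_cons, List.filter_cons]
      by_cases h : j < f b
      · rw [if_pos (by simpa using h), List.length_cons, ih]
        push_cast
        omega
      · rw [if_neg (by simpa using h), ih]
        have : min (f b) (j + 1) = min (f b) j := by omega
        omega

theorem pvMinSum_mono (f : String → Int) (j j' : Int) (h : j ≤ j') :
    ∀ (l : List String), (l.map (fun b => min (f b) j)).sum ≤ (l.map (fun b => min (f b) j')).sum := by
  intro l
  induction l with
  | nil => simp
  | cons b t ih => simp only [List.map_cons, List.sum_cons]; have : min (f b) j ≤ min (f b) j' := by omega
                   omega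

theorem pvMinSum_le (f : String → Int) (j : Int) :
    ∀ (l : List String), (l.map (fun b => min (f b) j)).sum ≤ (l.map f).sum := by
  intro l
  induction l with
  | nil => simp
  | cons b t ih => simp only [List.map_cons, List.sum_cons]; have : min (f b) j ≤ f b := min_le_left _ _
                   omega

theorem pvMinSum_eq_of (f : String → Int) (j : Int) :
    ∀ (l : List String), (∀ b ∈ l, f b ≤ j) → (l.map (fun b => min (f b) j)).sum = (l.map f).sum := by
  intro l hl
  apply congrArg
  apply List.map_congr_left
  intro b hb
  have := hl b hb
  omega

def pvFs (fitted minw : PySem.Dict String Int) (order : List String) (j : Int) : Int :=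
  (order.map (fun b => min (pvSlf fitted minw b) j)).sum

theorem pvAOuter_stop (minw : PySem.Dict String Int) (order : List String)
    (d : PySem.Dict String Int) (ov : Int) (h : ov ≤ 0) :
    pvAOuter minw order d ov = d := by
  rw [pvAOuter, dif_neg (by omega)]

theorem pvAOuter_done (minw fitted : PySem.Dict String Int)
    (hnd : (fitted.items.map (·.1)).Nodup)
    (order : List String) (hmem : ∀ b ∈ order, b ∈ fitted.items.map (·.1)) (hordnd : order.Nodup)
    (g : String → Int) (ov : Int)
    (hfil : order.filter (fun b => decide (minw.getD b (g b) < g b)) = []) :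
    pvAOuter minw order (pvStateD fitted.items g) ov = pvStateD fitted.items g := by
  by_cases hov : ov ≤ 0
  · exact pvAOuter_stop _ _ _ _ hov
  · rw [pvAOuter, dif_pos (by omega)]
    rw [pvAInner_spec minw fitted.items hnd order g ov false hmem hordnd (by omega)]
    rw [hfil]
    dsimp only
    simp only [List.take_nil, List.isEmpty_nil, Bool.not_true, Bool.or_false, List.length_nil]
    rw [dif_neg (by simp)]
    exact pvStateD_congr _ _ _ (fun b _ => by simp)

theorem pvAOuter_spec (minw fitted : PySem.Dict String Int)
    (hnd : (fitted.items.map (·.1)).Nodup)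
    (order : List String) (hperm : order.Perm (fitted.items.map (·.1)))
    (K r ov : Int) (hK0 : 0 ≤ K) (hr0 : 0 ≤ r) (hov : 0 < ov)
    (hsum : pvFs fitted minw order K + r = min ov ((order.map (pvSlf fitted minw)).sum))
    (hcnt : r = 0 ∨ r < ((order.filter (fun b => decide (K < pvSlf fitted minw b))).length : Int)) :
    ∀ (t : Nat) (j : Int), 0 ≤ j → j + (t : Int) = K →
      pvAOuter minw order
          (pvStateD fitted.items (fun b => pvW fitted b - min (pvSlf fitted minw b) j))
          (ov - pvFs fitted minw order j)
        = pvStateD fitted.items (fun b => pvW fitted b -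
            (min (pvSlf fitted minw b) K +
              (if b ∈ (order.filter (fun x => decide (K < pvSlf fitted minw x))).take r.toNat
               then 1 else 0))) := by
  have hordnd : order.Nodup := hperm.nodup_iff.mpr hnd
  have hmem : ∀ b ∈ order, b ∈ fitted.items.map (·.1) := fun b hb => hperm.mem_iff.mp hb
  have hmem' : ∀ b ∈ fitted.items.map (·.1), b ∈ order := fun b hb => hperm.mem_iff.mpr hb
  have hSfs : ∀ j : Int, pvFs fitted minw order j ≤ (order.map (pvSlf fitted minw)).sum :=
    fun j => pvMinSum_le _ j order
  have hfs_succ : ∀ j : Int, pvFs fitted minw order (j + 1) = pvFs fitted minw order j +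
      ((order.filter (fun b => decide (j < pvSlf fitted minw b))).length : Int) :=
    fun j => pvMinSum_succ _ j order
  intro t
  induction t with
  | zero =>
      intro j hj hjt
      have hjK : j = K := by push_cast at hjt; omega
      subst hjK
      by_cases hr : r = 0
      · -- no leftover: extras are empty and the j-round state is final
        rw [hr]
        simp only [Int.toNat_zero, List.take_zero, List.not_mem_nil, if_false, add_zero]
        by_cases hovc : ov - pvFs fitted minw order j ≤ 0
        · exact pvAOuter_stop _ _ _ _ hovc
        · have hfsS : pvFs fitted minw order j = (order.map (pvSlf fitted minw)).sum := by
            have h1 := min_le_left ov ((order.map (pvSlf fitted minw)).sum)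
            have h2 := min_le_right ov ((order.map (pvSlf fitted minw)).sum)
            omega
          have hcnt0 : ((order.filter (fun b => decide (j < pvSlf fitted minw b))).length : Int) = 0 := by
            have h1 := hfs_succ j
            have h2 := hSfs (j + 1)
            omega
          have hfil' : order.filter (fun b =>
              decide (minw.getD b (pvW fitted b - min (pvSlf fitted minw b) j)
                < pvW fitted b - min (pvSlf fitted minw b) j)) = [] := by
            rw [List.filter_congr (fun b _ => pvElig fitted minw j hj b)]
            rw [← List.length_eq_zero_iff]
            omega
          exact pvAOuter_done minw fitted hnd order hmem hordnd _ _ hfil'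
      · -- leftover r > 0: a final partial round over the first r shrinkable buttons
        have hrlt : r < ((order.filter (fun b => decide (j < pvSlf fitted minw b))).length : Int) := by
          rcases hcnt with h | h
          · exact absurd h hr
          · exact h
        have hrpos : 0 < r := by omega
        have hfs1 := hfs_succ j
        have hS1 := hSfs (j + 1)
        have hminov : pvFs fitted minw order j + r = ov := by
          have h1 := min_le_left ov ((order.map (pvSlf fitted minw)).sum)
          have h2 := min_le_right ov ((order.map (pvSlf fitted minw)).sum)
          omega
        rw [pvAOuter, dif_pos (by omega)]
        rw [pvAInner_spec minw fitted.items hnd order _ _ false hmem hordnd (by omega)]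
        simp only [List.filter_congr (fun b _ => pvElig fitted minw j hj b)]
        have hovE : (ov - pvFs fitted minw order j).toNat = r.toNat := by omega
        rw [hovE]
        set E := order.filter (fun b => decide (j < pvSlf fitted minw b)) with hE
        have hlen : (E.take r.toNat).length = r.toNat := by
          rw [List.length_take]
          omega
        have hne : (E.take r.toNat).isEmpty = false := by
          cases h : E.take r.toNat with
          | nil => rw [h] at hlen; simp at hlen; omega
          | cons a l => simp
        simp only [hne, Bool.not_false, Bool.or_true]
        rw [dif_pos trivial]
        have hz : ov - pvFs fitted minw order j - ((E.take r.toNat).length : Int) = 0 := by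
          rw [hlen]; omega
        rw [hz, pvAOuter_stop _ _ _ _ (le_refl 0)]
        apply pvStateD_congr
        intro b _
        by_cases hbE : b ∈ E.take r.toNat
        · rw [if_pos hbE, if_pos hbE]
          omega
        · rw [if_neg hbE, if_neg hbE]
          omega
  | succ t iht =>
      intro j hj hjt
      have hjK : j < K := by push_cast at hjt; omega
      by_cases hc0 : ((order.filter (fun b => decide (j < pvSlf fitted minw b))).length : Int) = 0
      · -- stalled: no button is above its minimum any more — A stops, and the state is already final
        have hall : ∀ b ∈ order, pvSlf fitted minw b ≤ j := by
          intro b hb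
          have hfil : order.filter (fun b => decide (j < pvSlf fitted minw b)) = [] := by
            rw [← List.length_eq_zero_iff]; omega
          have := List.filter_eq_nil_iff.mp hfil b hb
          simp at this
          omega
        have hfsS : pvFs fitted minw order j = (order.map (pvSlf fitted minw)).sum :=
          pvMinSum_eq_of _ j order hall
        have hfsK : pvFs fitted minw order K = (order.map (pvSlf fitted minw)).sum :=
          pvMinSum_eq_of _ K order (fun b hb => le_trans (hall b hb) (by omega))
        have hrz : r = 0 := by
          have h2 := min_le_right ov ((order.map (pvSlf fitted minw)).sum)
          omega
        have hfil' : order.filter (fun b =>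
            decide (minw.getD b (pvW fitted b - min (pvSlf fitted minw b) j)
              < pvW fitted b - min (pvSlf fitted minw b) j)) = [] := by
          rw [List.filter_congr (fun b _ => pvElig fitted minw j hj b)]
          rw [← List.length_eq_zero_iff]
          omega
        rw [pvAOuter_done minw fitted hnd order hmem hordnd _ _ hfil']
        rw [hrz]
        simp only [Int.toNat_zero, List.take_zero, List.not_mem_nil, if_false, add_zero]
        apply pvStateD_congr
        intro b hb
        have hbo : b ∈ order := hmem' b hb
        have := hall b hbo
        have h1 : min (pvSlf fitted minw b) j = pvSlf fitted minw b := by omega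
        have h2 : min (pvSlf fitted minw b) K = pvSlf fitted minw b := by omega
        rw [h1, h2]
      · -- a complete round from stage j to stage j+1
        have hcpos : 0 < ((order.filter (fun b => decide (j < pvSlf fitted minw b))).length : Int) := by
          omega
        have hfs1 := hfs_succ j
        have hmono : pvFs fitted minw order (j + 1) ≤ pvFs fitted minw order K :=
          pvMinSum_mono _ (j + 1) K (by omega) order
        have hKov : pvFs fitted minw order K ≤ ov := by
          have h1 := min_le_left ov ((order.map (pvSlf fitted minw)).sum)
          omega
        have hovc : ((order.filter (fun b => decide (j < pvSlf fitted minw b))).length : Int)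
            ≤ ov - pvFs fitted minw order j := by omega
        rw [pvAOuter, dif_pos (by omega)]
        rw [pvAInner_spec minw fitted.items hnd order _ _ false hmem hordnd (by omega)]
        simp only [List.filter_congr (fun b _ => pvElig fitted minw j hj b)]
        set E := order.filter (fun b => decide (j < pvSlf fitted minw b)) with hE
        have htk : E.take (ov - pvFs fitted minw order j).toNat = E :=
          List.take_of_length_le (by omega)
        rw [htk]
        have hne : E.isEmpty = false := by
          cases h : E with
          | nil => rw [h] at hcpos; simp at hcpos
          | cons a l => simp
        simp only [hne, Bool.not_false, Bool.or_true]
        rw [dif_pos trivial]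
        have hz : ov - pvFs fitted minw order j - (E.length : Int) = ov - pvFs fitted minw order (j + 1) := by
          omega
        rw [hz]
        have hst : pvStateD fitted.items (fun x => if x ∈ E then
              pvW fitted x - min (pvSlf fitted minw x) j - 1 else pvW fitted x - min (pvSlf fitted minw x) j)
            = pvStateD fitted.items (fun b => pvW fitted b - min (pvSlf fitted minw b) (j + 1)) := by
          apply pvStateD_congr
          intro b hb
          have hbo : b ∈ order := hmem' b hb
          by_cases hbE : b ∈ E
          · have hlt : j < pvSlf fitted minw b := by
              have := (List.mem_filter.mp hbE).2
              simpa using this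
            rw [if_pos hbE]
            omega
          · have hge : ¬ j < pvSlf fitted minw b := by
              intro hlt
              exact hbE (List.mem_filter.mpr ⟨hbo, by simpa using hlt⟩)
            rw [if_neg hbE]
            omega
        rw [hst]
        exact iht (j + 1) (by omega) (by push_cast at hjt ⊢; omega)

theorem pvBDist_getD_notmem (b : String) :
    ∀ (l : List (String × Int)) (k rem : Int) (dacc : PySem.Dict String Int),
      b ∉ l.map (·.1) → (pvBDist l k rem dacc).1.getD b 0 = dacc.getD b 0 := by
  intro l
  induction l with
  | nil => intro k rem dacc _; simp [pvBDist]
  | cons p rest ih =>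
      intro k rem dacc hb
      obtain ⟨b0, s0⟩ := p
      have hne : b ≠ b0 := by
        intro h; exact hb (by simp [h])
      have hbrest : b ∉ rest.map (·.1) := fun h => hb (by simp at h ⊢; tauto)
      rw [pvBDist]
      split
      · rw [ih _ _ _ hbrest, PySem.Dict.getD_insert_of_ne dacc _ _ hne]
      · rw [ih _ _ _ hbrest, PySem.Dict.getD_insert_of_ne dacc _ _ hne]

theorem pvBDist_getD (sl : String → Int) :
    ∀ (l : List String) (k rem : Int) (dacc : PySem.Dict String Int), l.Nodup → 0 ≤ rem →
      ∀ b ∈ l, (pvBDist (l.map (fun x => (x, sl x))) k rem dacc).1.getD b 0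
        = min (sl b) k +
          (if b ∈ (l.filter (fun x => decide (k < sl x))).take rem.toNat then 1 else 0) := by
  intro l
  induction l with
  | nil => intro _ _ _ _ _ b hb; simp at hb
  | cons b0 rest ih =>
      intro k rem dacc hnodup hrem b hb
      have hb0rest : b0 ∉ rest := (List.nodup_cons.mp hnodup).1
      rw [List.map_cons, pvBDist]
      have htake0 : (if sl b0 ≤ k then sl b0 else k) = min (sl b0) k := (min_def _ _).symm
      by_cases hcond : k < sl b0 ∧ 0 < rem
      · rw [if_pos hcond]
        have hfilter : (b0 :: rest).filter (fun x => decide (k < sl x))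
            = b0 :: rest.filter (fun x => decide (k < sl x)) := by
          rw [List.filter_cons]; simp [hcond.1]
        have htake : (b0 :: rest.filter (fun x => decide (k < sl x))).take rem.toNat
            = b0 :: (rest.filter (fun x => decide (k < sl x))).take (rem - 1).toNat := by
          rw [show rem.toNat = (rem - 1).toNat + 1 by omega, List.take_succ_cons]
        rcases List.mem_cons.mp hb with rfl | hbr
        · have hnm : b ∉ (rest.map (fun x => (x, sl x))).map (·.1) := by
            simpa using hb0rest
          rw [pvBDist_getD_notmem _ _ _ _ _ hnm, PySem.Dict.getD_insert_self]
          rw [hfilter, htake, htake0]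
          simp
        · have hne : b ≠ b0 := fun h => hb0rest (h ▸ hbr)
          rw [ih k (rem - 1) _ (List.nodup_cons.mp hnodup).2 (by omega) b hbr]
          rw [hfilter, htake]
          simp [hne]
      · rw [if_neg hcond]
        rcases List.mem_cons.mp hb with rfl | hbr
        · have hnm : b ∉ (rest.map (fun x => (x, sl x))).map (·.1) := by
            simpa using hb0rest
          rw [pvBDist_getD_notmem _ _ _ _ _ hnm, PySem.Dict.getD_insert_self, htake0]
          have hnin : b ∉ ((b :: rest).filter (fun x => decide (k < sl x))).take rem.toNat := by
            intro hmem
            have hmem' := List.mem_of_mem_take hmem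
            rcases Classical.em (k < sl b) with hlt | hge
            · have hrem0 : rem = 0 := by
                rcases Classical.em (0 < rem) with h | h
                · exact absurd ⟨hlt, h⟩ hcond
                · omega
              rw [hrem0] at hmem
              simp at hmem
            · rw [List.mem_filter] at hmem'
              exact hge (by simpa using hmem'.2)
          simp [hnin]
        · have hne : b ≠ b0 := fun h => hb0rest (h ▸ hbr)
          rw [ih k rem _ (List.nodup_cons.mp hnodup).2 hrem b hbr]
          congr 1
          by_cases hb0f : k < sl b0
          · have hrem0 : rem = 0 := by
              rcases Classical.em (0 < rem) with h | h
              · exact absurd ⟨hb0f, h⟩ hcond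
              · omega
            rw [hrem0]
            simp
          · have hfilter : (b0 :: rest).filter (fun x => decide (k < sl x))
                = rest.filter (fun x => decide (k < sl x)) := by
              rw [List.filter_cons]; simp [hb0f]
            rw [hfilter]

theorem pvZipSelf (f : String → Int) :
    ∀ (l : List String), l.zip (l.map f) = l.map (fun x => (x, f x)) := by
  intro l
  induction l with
  | nil => simp
  | cons x t ih => simp [ih]

theorem pvStateD_id (fitted : PySem.Dict String Int) (hnd : (fitted.items.map (·.1)).Nodup) :
    pvStateD fitted.items (fun b => pvW fitted b) = fitted := by
  apply PySem.Dict.ext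
  show fitted.items.map _ = fitted.items
  have h : ∀ p ∈ fitted.items, (fun p => (p.1, pvW fitted p.1)) p = id p := by
    intro p hp
    have hmem : (p.1, p.2) ∈ fitted.items := by simpa using hp
    have := PySem.Dict.getD_of_mem_items fitted hmem (by simpa [PySem.Dict.keys] using hnd) 0
    simp only [pvW, this, id]
  rw [List.map_congr_left h, List.map_id]

theorem pvBridge (fitted minw : PySem.Dict String Int) (ov : Int)
    (hnd : (fitted.items.map (·.1)).Nodup)
    (order : List String) (hperm : order.Perm (fitted.items.map (·.1)))
    (hov : 0 < ov) :
    (pvAOuter minw order fitted ov).items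
      = fitted.items.map (fun p => (p.1, p.2 -
          ((pvBDist (order.zip (order.map (pvSlf fitted minw)))
            (pvBLevel (PySem.List.sorted (order.map (pvSlf fitted minw)) (fun x => x) false) 0
              (min ov (order.map (pvSlf fitted minw)).sum)
              (((order.map (pvSlf fitted minw)).length : Nat) : Int)).1
            (pvBLevel (PySem.List.sorted (order.map (pvSlf fitted minw)) (fun x => x) false) 0
              (min ov (order.map (pvSlf fitted minw)).sum)
              (((order.map (pvSlf fitted minw)).length : Nat) : Int)).2
            PySem.Dict.empty).1.getD p.1 0))) := by
  have hordnd : order.Nodup := hperm.nodup_iff.mpr hnd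
  set slackL := order.map (pvSlf fitted minw) with hslackL
  set sortedL := PySem.List.sorted slackL (fun x => x) false with hsortedL
  set S := slackL.sum with hS
  have hsp : sortedL.Perm slackL := PySem.List.sorted_perm _ _ _
  have hS0 : 0 ≤ S := by
    apply List.sum_nonneg
    intro x hx
    obtain ⟨b, _, rfl⟩ := List.mem_map.mp hx
    exact pvSlf_nonneg fitted minw b
  obtain ⟨hK0, hr0, hsum, hcnt⟩ := pvBLevel_spec sortedL 0 (min ov S) ((slackL.length : Int))
    (by rw [hsortedL, PySem.List.length_sorted])
    (by simpa using PySem.List.sorted_pairwise slackL (fun x => x))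
    (by
      intro x hx
      have hx' : x ∈ slackL := (PySem.List.mem_sorted _ _ _ _).mp hx
      obtain ⟨b, _, rfl⟩ := List.mem_map.mp hx'
      exact pvSlf_nonneg fitted minw b)
    (by omega)
    (by
      have h1 : (sortedL.map (fun x => x - 0)).sum = S := by
        simp only [sub_zero, List.map_id']
        exact hsp.sum_eq
      omega)
  set K := (pvBLevel sortedL 0 (min ov S) ((slackL.length : Int))).1 with hKdef
  set r := (pvBLevel sortedL 0 (min ov S) ((slackL.length : Int))).2 with hrdef
  have hsum' : pvFs fitted minw order K + r = min ov S := by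
    have e1 : (sortedL.map (fun x => min x K - 0)).sum = (slackL.map (fun x => min x K - 0)).sum :=
      (hsp.map _).sum_eq
    have e2 : (slackL.map (fun x => min x K - 0)).sum = pvFs fitted minw order K := by
      rw [hslackL, List.map_map]
      unfold pvFs
      apply congrArg
      apply List.map_congr_left
      intro b _
      simp only [Function.comp]
      omega
    rw [← e2, ← e1]
    exact hsum
  have hcnt' : r = 0 ∨ r < ((order.filter (fun b => decide (K < pvSlf fitted minw b))).length : Int) := by
    rcases hcnt with h | h
    · exact Or.inl h
    · right
      have e1 : sortedL.countP (fun x => decide (K < x)) = slackL.countP (fun x => decide (K < x)) :=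
        hsp.countP_eq _
      have e2 : slackL.countP (fun x => decide (K < x))
          = order.countP (fun b => decide (K < pvSlf fitted minw b)) := by
        rw [hslackL, List.countP_map]
        rfl
      have e3 : order.countP (fun b => decide (K < pvSlf fitted minw b))
          = (order.filter (fun b => decide (K < pvSlf fitted minw b))).length :=
        List.countP_eq_length_filter
      rw [e1, e2, e3] at h
      exact h
  have hstart : pvStateD fitted.items (fun b => pvW fitted b - min (pvSlf fitted minw b) 0) = fitted := by
    rw [pvStateD_congr _ _ (fun b => pvW fitted b) (by
      intro b _
      have := pvSlf_nonneg fitted minw b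
      show pvW fitted b - min (pvSlf fitted minw b) 0 = pvW fitted b
      omega)]
    exact pvStateD_id fitted hnd
  have hfs0 : pvFs fitted minw order 0 = 0 :=
    pvMinSum_zero _ (pvSlf_nonneg fitted minw) order
  have hmain := pvAOuter_spec minw fitted hnd order hperm K r ov hK0 hr0 hov hsum' hcnt'
    K.toNat 0 (le_refl 0) (by omega)
  rw [hfs0, hstart, show ov - 0 = ov by omega] at hmain
  rw [hmain]
  rw [pvZipSelf (pvSlf fitted minw) order]
  show List.map _ _ = _
  apply List.map_congr_left
  intro p hp
  have hpkeys : p.1 ∈ fitted.items.map (·.1) := List.mem_map.mpr ⟨p, hp, rfl⟩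
  have hpord : p.1 ∈ order := hperm.mem_iff.mpr hpkeys
  have hpw : pvW fitted p.1 = p.2 :=
    PySem.Dict.getD_of_mem_items fitted (by simpa using hp)
      (by simpa [PySem.Dict.keys] using hnd) 0
  have hrem := pvBDist_getD (pvSlf fitted minw) order K r PySem.Dict.empty hordnd hr0 p.1 hpord
  dsimp only
  rw [hrem, hpw]

-- ===== VERDICT (by name: the statement is the Claim_ definition above) =====
theorem fit_button_widths_to_target_py_spec : Claim_equal_fit_button_widths_to_target_py := by
  intro base_widths min_widths target_width spacing _
  unfold Spec_fit_button_widths_to_target_py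
  simp only [fit_button_widths_to_target_py, fit_button_widths_to_target_py_alt]
  split_ifs with h1 h2
  · rfl
  · rfl
  · have hnd : ((PySem.Dict.ofList base_widths (ν := Int)).items.map (·.1)).Nodup := by
      simpa [PySem.Dict.keys] using PySem.Dict.nodup_keys_ofList base_widths
    apply pvBridge
    · exact hnd
    · simpa [PySem.Dict.keys] using
        PySem.List.sorted2_perm (PySem.Dict.ofList base_widths (ν := Int)).keys _ _ true
    · omega
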